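-- pv_equiv track=rewrite | github.com/AC757/AI-Job-Screening-Agent | agents/matching_agent.py | expand_skills
-- ===== SOURCE A (Python) =====
-- def expand_skills(skill_set: set[str], synonyms: dict) -> set[str]:
--     """Expands a set of skills using the synonym dictionary."""
--     if not skill_set:
--         return set()
--     expanded = set(skill_set) # Start with original skills
--     for skill in skill_set:
--         # Check direct synonyms
--         if skill in synonyms:
--             expanded.update(synonyms[skill])
--         # Check if skill is a synonym value for a broader category
--         for key, value_list in synonyms.items():
--             if skill in value_list:
--                 expanded.add(key) # Add the broader category too
--     return expanded
-- ===== SOURCE B (Python) =====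
-- def expand_skills(skill_set: set[str], synonyms: dict) -> set[str]:
--     """Expands a set of skills using the synonym dictionary."""
--     # Build a reverse index value -> [keys] once, so the per-skill scan of all
--     # synonym entries disappears.
--     reverse = {}
--     for key, value_list in synonyms.items():
--         for v in value_list:
--             reverse.setdefault(v, []).append(key)
--     expanded = set(skill_set)
--     for skill in skill_set:
--         expanded.update(synonyms.get(skill, ()))
--         expanded.update(reverse.get(skill, ()))
--     return expanded
-- ===== Notes on version B (the rewrite author's own statement) =====
-- stated objective: faster
-- what changed: Builds a reverse index (synonym value -> list of keys) once, then a single pass over skill_set does two O(1)-lookup updates per skill, replacing A's per-skill rescan of the whole synonyms dict.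
import Mathlib
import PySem

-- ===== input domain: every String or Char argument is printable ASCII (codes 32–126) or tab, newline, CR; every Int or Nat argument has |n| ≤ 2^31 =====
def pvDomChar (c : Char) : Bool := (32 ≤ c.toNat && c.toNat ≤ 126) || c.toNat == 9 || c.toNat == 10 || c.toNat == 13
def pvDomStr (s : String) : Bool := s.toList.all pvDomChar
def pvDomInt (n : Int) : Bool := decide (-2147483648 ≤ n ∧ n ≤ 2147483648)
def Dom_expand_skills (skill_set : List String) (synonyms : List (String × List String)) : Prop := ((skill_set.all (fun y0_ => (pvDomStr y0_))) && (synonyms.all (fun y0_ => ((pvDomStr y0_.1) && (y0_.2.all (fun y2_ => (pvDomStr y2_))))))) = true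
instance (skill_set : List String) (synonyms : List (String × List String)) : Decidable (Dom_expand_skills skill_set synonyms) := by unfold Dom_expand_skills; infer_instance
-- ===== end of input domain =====

-- B replaces A's per-skill rescan of the whole synonyms dict by a reverse index built once (faster).

-- ===== PORT A =====
def expand_skills (skill_set : List String) (synonyms : List (String × List String)) : List String :=
  if skill_set = [] then []
  else
    let syn := PySem.Dict.mk synonyms
    skill_set.foldl
      (fun expanded skill =>
        let expanded :=
          if PySem.Dict.contains syn skill then
            PySem.Set.update expanded (PySem.Dict.getD syn skill [])
          else expanded
        -- for key, value_list in synonyms.items(): if skill in value_list: expanded.add(key)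
        synonyms.foldl
          (fun e kv => if kv.2.contains skill then PySem.Set.add e kv.1 else e)
          expanded)
      (PySem.Set.ofList skill_set)

-- ===== PORT B =====
-- reverse = {}; for key, value_list in synonyms.items(): for v in value_list: reverse.setdefault(v, []).append(key)
def pvReverseIndex (synonyms : List (String × List String)) : PySem.Dict String (List String) :=
  synonyms.foldl
    (fun rev kv =>
      kv.2.foldl (fun rev v => PySem.Dict.modify rev v [] (fun l => l ++ [kv.1])) rev)
    PySem.Dict.empty

def expand_skills_alt (skill_set : List String) (synonyms : List (String × List String)) : List String :=
  let syn := PySem.Dict.mk synonyms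
  let reverse := pvReverseIndex synonyms
  skill_set.foldl
    (fun expanded skill =>
      let expanded := PySem.Set.update expanded (PySem.Dict.getD syn skill [])
      PySem.Set.update expanded (PySem.Dict.getD reverse skill []))
    (PySem.Set.ofList skill_set)

-- ===== PRECONDITION & SPEC =====
def Spec_expand_skills (skill_set : List String) (synonyms : List (String × List String)) (out : List String) : Prop := out = expand_skills_alt skill_set synonyms
instance (skill_set : List String) (synonyms : List (String × List String)) (out : List String) : Decidable (Spec_expand_skills skill_set synonyms out) := by unfold Spec_expand_skills; infer_instance

-- ===== CLAIM (what is proved, stated in full; the proofs are below) =====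
def Claim_equal_expand_skills : Prop := ∀ (skill_set : List String) (synonyms : List (String × List String)), Dom_expand_skills skill_set synonyms → Spec_expand_skills skill_set synonyms (expand_skills skill_set synonyms)

-- ===== LEMMAS AND PROOFS =====

-- Set.update is a foldl of Set.add, so it splits over ++.
theorem set_update_append {α : Type} [BEq α] (s : PySem.Set α) (xs ys : List α) :
    PySem.Set.update s (xs ++ ys) = PySem.Set.update (PySem.Set.update s xs) ys :=
  List.foldl_append

-- Adding the same element n + 1 times is adding it once.
theorem set_update_replicate {α : Type} [BEq α] [LawfulBEq α] (s : PySem.Set α) (k : α) (n : Nat) :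
    PySem.Set.update s (List.replicate (n + 1) k) = PySem.Set.add s k := by
  induction n generalizing s with
  | zero => rfl
  | succ m ih =>
      show PySem.Set.update (PySem.Set.add s k) (List.replicate (m + 1) k) = PySem.Set.add s k
      rw [ih]
      simp [PySem.Set.add, PySem.Set.contains]
      split_ifs with h <;> simp [h]

-- The reverse index lists, for each value v, the keys whose value list mentions v,
-- once per mention and in synonyms order.
theorem getD_reverseIndex_aux (synonyms : List (String × List String)) (skill : String) :
    ∀ d : PySem.Dict String (List String),
      PySem.Dict.getD
        (synonyms.foldl
          (fun rev kv =>
            kv.2.foldl (fun rev v => PySem.Dict.modify rev v [] (fun l => l ++ [kv.1])) rev) d)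
        skill []
      = PySem.Dict.getD d skill []
          ++ synonyms.flatMap (fun kv => List.replicate (kv.2.count skill) kv.1) := by
  induction synonyms with
  | nil => intro d; simp
  | cons kv tl ih =>
      intro d
      simp only [List.foldl_cons, List.flatMap_cons]
      rw [ih, show List.foldl (fun rev v => PySem.Dict.modify rev v [] (fun l => l ++ [kv.1])) d kv.2
            = List.foldl (fun d p => PySem.Dict.modify d p.1 [] (fun l => l ++ [p.2])) d
                (kv.2.map (fun v => (v, kv.1))) from (List.foldl_map (f := fun v => (v, kv.1)) (g := fun d p => PySem.Dict.modify d p.1 [] (fun l => l ++ [p.2])) (l := kv.2) (init := d)).symm,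
          PySem.Dict.getD_foldl_modify_append]
      rw [List.filter_map, List.map_map, List.append_assoc]
      congr 2
      have hcount : (kv.2.filter (fun v => v == skill)).length = kv.2.count skill := by
        simp [List.count, List.countP_eq_length_filter]
      calc (kv.2.filter (fun v => v == skill)).map ((fun p : String × String => p.2) ∘ (fun v => (v, kv.1)))
          = (kv.2.filter (fun v => v == skill)).map (fun _ => kv.1) := rfl
        _ = List.replicate (kv.2.count skill) kv.1 := by
            rw [List.map_const', hcount]

theorem getD_reverseIndex (synonyms : List (String × List String)) (skill : String) :
    PySem.Dict.getD (pvReverseIndex synonyms) skill []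
      = synonyms.flatMap (fun kv => List.replicate (kv.2.count skill) kv.1) := by
  unfold pvReverseIndex
  rw [getD_reverseIndex_aux]
  simp [PySem.Dict.getD_empty]

-- A's inner scan over synonyms.items() equals one Set.update with the reverse-index entry.
theorem inner_scan_eq (synonyms : List (String × List String)) (skill : String) (e : PySem.Set String) :
    synonyms.foldl (fun e kv => if kv.2.contains skill then PySem.Set.add e kv.1 else e) e
      = PySem.Set.update e (PySem.Dict.getD (pvReverseIndex synonyms) skill []) := by
  rw [getD_reverseIndex]
  induction synonyms generalizing e with
  | nil => rfl
  | cons kv tl ih =>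
      simp only [List.foldl_cons, List.flatMap_cons]
      rw [ih, set_update_append]
      congr 1
      rcases h : kv.2.count skill with _ | n
      · have hc : kv.2.contains skill = false := by
          by_contra hcc
          simp only [Bool.not_eq_false, List.contains_eq_mem, decide_eq_true_eq] at hcc
          have := List.count_pos_iff.mpr hcc
          omega
        simp only [hc, Bool.false_eq_true, if_false, List.replicate_zero]
        rfl
      · have hc : kv.2.contains skill = true := by
          simp only [List.contains_eq_mem, decide_eq_true_eq]
          exact List.count_pos_iff.mp (by omega)
        rw [hc, if_pos rfl]
        exact (set_update_replicate e kv.1 n).symm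

-- The two per-skill step functions agree.
theorem step_eq (synonyms : List (String × List String)) :
    (fun (expanded : PySem.Set String) (skill : String) =>
        let expanded :=
          if PySem.Dict.contains (PySem.Dict.mk synonyms) skill then
            PySem.Set.update expanded (PySem.Dict.getD (PySem.Dict.mk synonyms) skill [])
          else expanded
        synonyms.foldl
          (fun e kv => if kv.2.contains skill then PySem.Set.add e kv.1 else e)
          expanded)
    = (fun (expanded : PySem.Set String) (skill : String) =>
        let expanded := PySem.Set.update expanded (PySem.Dict.getD (PySem.Dict.mk synonyms) skill [])
        PySem.Set.update expanded (PySem.Dict.getD (pvReverseIndex synonyms) skill [])) := by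
  funext e skill
  simp only []
  rw [inner_scan_eq]
  congr 1
  by_cases h : PySem.Dict.contains (PySem.Dict.mk synonyms) skill = true
  · rw [if_pos h]
  · simp only [Bool.not_eq_true] at h
    rw [if_neg (by simp [h])]
    have h0 : PySem.Dict.getD (PySem.Dict.mk synonyms) skill ([] : List String) = [] := by
      simp [PySem.Dict.getD_of_not_contains, h]
    rw [h0]
    rfl

-- ===== VERDICT =====
theorem expand_skills_spec : Claim_equal_expand_skills := by
  intro skill_set synonyms _
  unfold Spec_expand_skills expand_skills expand_skills_alt
  rcases skill_set with _ | ⟨s, tl⟩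
  · rfl
  · simp only [reduceIte, List.cons_ne_nil]
    rw [step_eq]
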